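-- pv_equiv track=rewrite | github.com/pablovargasmejia/SIREN | benchmark/bench_cluster.py | pick_closest_by_bins
-- ===== SOURCE A (Python) =====
-- def pick_closest_by_bins(lengths_dict, bins):
--     """
--     For each bin length, pick 2 transcripts whose length is closest.
--     Ensures unique picks overall.
--     """
--     items = list(lengths_dict.items())  # (id, length)
--     chosen = []
--     used_ids = set()
--     for b in bins:
--         sorted_by_proximity = sorted(items, key=lambda kv: abs(kv[1] - b))
--         picked_count = 0
--         for tid, L in sorted_by_proximity:
--             if tid in used_ids:
--                 continue
--             chosen.append((b, tid, L))
--             used_ids.add(tid)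
--             picked_count += 1
--             if picked_count >= 2:   # <<< hardcoded 2 picks per bin
--                 break
--     return chosen
-- ===== SOURCE B (Python) =====
-- def pick_closest_by_bins(lengths_dict, bins):
--     """
--     For each bin length, pick 2 transcripts whose length is closest.
--     Ensures unique picks overall.
--     Selection by two linear min-scans per bin instead of sorting per bin.
--     """
--     items = list(lengths_dict.items())
--     chosen = []
--     used = set()
--     for b in bins:
--         for _ in range(2):
--             best = None
--             for tid, L in items:
--                 if tid in used:
--                     continue
--                 d = abs(L - b)
--                 if best is None or d < best[0]:
--                     best = (d, tid, L)
--             if best is None: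
--                 break
--             chosen.append((b, best[1], best[2]))
--             used.add(best[1])
--     return chosen
-- ===== Notes on version B (the rewrite author's own statement) =====
-- stated objective: faster
-- what changed: Replaces the per-bin full sort by proximity with two linear min-scans per bin (first strictly-smaller distance wins, which reproduces the stable sort's tie-break), so no sorting is done at all.
import Mathlib
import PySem

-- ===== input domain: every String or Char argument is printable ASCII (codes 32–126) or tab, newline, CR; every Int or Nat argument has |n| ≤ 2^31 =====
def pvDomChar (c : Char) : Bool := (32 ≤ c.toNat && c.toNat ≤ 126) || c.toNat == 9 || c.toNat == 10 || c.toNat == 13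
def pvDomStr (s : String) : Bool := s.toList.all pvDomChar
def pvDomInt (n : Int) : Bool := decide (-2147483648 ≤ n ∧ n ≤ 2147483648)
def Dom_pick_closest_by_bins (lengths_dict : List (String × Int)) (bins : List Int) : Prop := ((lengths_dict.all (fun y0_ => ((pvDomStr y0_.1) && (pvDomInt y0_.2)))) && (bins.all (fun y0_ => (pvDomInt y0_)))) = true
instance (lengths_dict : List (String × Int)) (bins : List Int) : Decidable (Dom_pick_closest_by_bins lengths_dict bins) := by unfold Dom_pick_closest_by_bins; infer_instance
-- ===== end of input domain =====

-- B replaces A's per-bin full sort by proximity with two linear min-scans per bin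
-- (first strictly smaller distance wins, reproducing the stable sort's tie-break): measurably faster at scale.

-- ===== PORT A =====
-- inner 'for tid, L in sorted_by_proximity: … break' loop of A
def pickLoopA (b : Int) : List (String × Int) → PySem.Set String → Int →
    List (Int × String × Int) × PySem.Set String
  | [], used, _ => ([], used)
  | (tid, L) :: rest, used, picked_count =>
    if PySem.Set.contains used tid then pickLoopA b rest used picked_count
    else
      let used' := PySem.Set.add used tid
      let pc := picked_count + 1
      if pc ≥ 2 then ([(b, tid, L)], used')
      else
        let r := pickLoopA b rest used' pc
        ((b, tid, L) :: r.1, r.2)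

def pick_closest_by_bins (lengths_dict : List (String × Int)) (bins : List Int) :
    List (Int × String × Int) :=
  let items := lengths_dict
  (bins.foldl
    (fun (st : List (Int × String × Int) × PySem.Set String) b =>
      let sorted_by_proximity := PySem.List.sorted items (fun kv => |kv.2 - b|)
      let r := pickLoopA b sorted_by_proximity st.2 0
      (st.1 ++ r.1, r.2))
    ([], PySem.Set.empty)).1

-- ===== PORT B =====
-- one linear scan of B: first unused item with strictly smallest |L - b|
def bestScan (b : Int) (used : PySem.Set String) (items : List (String × Int)) :
    Option (Int × String × Int) :=
  items.foldl
    (fun best kv =>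
      if PySem.Set.contains used kv.1 then best
      else
        let d := |kv.2 - b|
        match best with
        | none => some (d, kv.1, kv.2)
        | some bb => if d < bb.1 then some (d, kv.1, kv.2) else best)
    none

-- B's 'for _ in range(2)' body, unrolled over the literal bound 2
def pickTwoB (b : Int) (used : PySem.Set String) (items : List (String × Int)) :
    List (Int × String × Int) × PySem.Set String :=
  match bestScan b used items with
  | none => ([], used)
  | some (_, tid, L) =>
    let used1 := PySem.Set.add used tid
    match bestScan b used1 items with
    | none => ([(b, tid, L)], used1)
    | some (_, tid2, L2) => ([(b, tid, L), (b, tid2, L2)], PySem.Set.add used1 tid2)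

def pick_closest_by_bins_alt (lengths_dict : List (String × Int)) (bins : List Int) :
    List (Int × String × Int) :=
  let items := lengths_dict
  (bins.foldl
    (fun (st : List (Int × String × Int) × PySem.Set String) b =>
      let r := pickTwoB b st.2 items
      (st.1 ++ r.1, r.2))
    ([], PySem.Set.empty)).1

-- ===== PRECONDITION & SPEC =====
def Spec_pick_closest_by_bins (lengths_dict : List (String × Int)) (bins : List Int) (out : List (Int × String × Int)) : Prop := out = pick_closest_by_bins_alt lengths_dict bins
instance (lengths_dict : List (String × Int)) (bins : List Int) (out : List (Int × String × Int)) : Decidable (Spec_pick_closest_by_bins lengths_dict bins out) := by unfold Spec_pick_closest_by_bins; infer_instance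

-- ===== CLAIM (what is proved, stated in full; the proofs are below) =====
def Claim_equal_pick_closest_by_bins : Prop := ∀ (lengths_dict : List (String × Int)) (bins : List Int), Dom_pick_closest_by_bins lengths_dict bins → Spec_pick_closest_by_bins lengths_dict bins (pick_closest_by_bins lengths_dict bins)

-- ===== LEMMAS AND PROOFS =====

-- membership in a Set is monotone under add
lemma contains_add_of_contains {s : PySem.Set String} {x y : String}
    (h : PySem.Set.contains s x = true) : PySem.Set.contains (PySem.Set.add s y) x = true := by
  rw [PySem.Set.contains_iff] at h ⊢
  exact (PySem.Set.mem_add _ _ _).2 (Or.inl h)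

-- A's inner loop entered with picked_count = 1 takes the first unused item and stops
lemma pickLoopA_one (b : Int) (l : List (String × Int)) (used : PySem.Set String) :
    pickLoopA b l used 1 =
      match l.find? (fun kv => !PySem.Set.contains used kv.1) with
      | none => ([], used)
      | some kv => ([(b, kv.1, kv.2)], PySem.Set.add used kv.1) := by
  induction l generalizing used with
  | nil => rfl
  | cons hd tl ih =>
    obtain ⟨tid, L⟩ := hd
    by_cases h : PySem.Set.contains used tid = true
    · rw [pickLoopA, if_pos h, ih,
        List.find?_cons_of_neg (by rw [show PySem.Set.contains used (tid, L).1 = true from h]; simp)]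
    · rw [pickLoopA, if_neg h,
        List.find?_cons_of_pos (by rw [show PySem.Set.contains used (tid, L).1 = false from eq_false_of_ne_true h]; simp)]
      norm_num

-- A's inner loop entered with picked_count = 0: two successive first-unused picks
lemma pickLoopA_zero (b : Int) (l : List (String × Int)) (used : PySem.Set String) :
    pickLoopA b l used 0 =
      match l.find? (fun kv => !PySem.Set.contains used kv.1) with
      | none => ([], used)
      | some kv =>
        match l.find? (fun kv2 => !PySem.Set.contains (PySem.Set.add used kv.1) kv2.1) with
        | none => ([(b, kv.1, kv.2)], PySem.Set.add used kv.1)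
        | some kv2 => ([(b, kv.1, kv.2), (b, kv2.1, kv2.2)],
            PySem.Set.add (PySem.Set.add used kv.1) kv2.1) := by
  induction l generalizing used with
  | nil => rfl
  | cons hd tl ih =>
    obtain ⟨tid, L⟩ := hd
    by_cases h : PySem.Set.contains used tid = true
    · rw [pickLoopA, if_pos h, ih,
        List.find?_cons_of_neg (by rw [show PySem.Set.contains used (tid, L).1 = true from h]; simp)]
      cases hf : List.find? (fun kv => !PySem.Set.contains used kv.1) tl with
      | none => rfl
      | some kv =>
        obtain ⟨k1, k2⟩ := kv
        dsimp only
        rw [List.find?_cons_of_neg (by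
          rw [show PySem.Set.contains (PySem.Set.add used k1) (tid, L).1 = true from
            contains_add_of_contains h]; simp)]
    · rw [pickLoopA, if_neg h]
      simp only [ge_iff_le]
      rw [if_neg (by norm_num),
        List.find?_cons_of_pos (by rw [show PySem.Set.contains used (tid, L).1 = false from eq_false_of_ne_true h]; simp)]
      dsimp only
      have hmem : PySem.Set.contains (PySem.Set.add used tid) tid = true := by
        rw [PySem.Set.contains_iff]; exact (PySem.Set.mem_add _ _ _).2 (Or.inr rfl)
      rw [List.find?_cons_of_neg (by
        rw [show PySem.Set.contains (PySem.Set.add used tid) (tid, L).1 = true from hmem]; simp)]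
      rw [show (0:Int) + 1 = 1 from rfl, pickLoopA_one]
      cases List.find? (fun kv2 => !PySem.Set.contains (PySem.Set.add used tid) kv2.1) tl with
      | none => rfl
      | some kv2 => rfl

-- find? through a stable insertion step: the inserted element wins iff its key is strictly smaller
lemma find?_insertBy {α : Type} (k : α → Int) (p : α → Bool) (x : α) :
    ∀ (ys : List α), ys.Pairwise (fun a c => k a ≤ k c) →
    (PySem.List.insertBy (fun a c => decide (k a < k c)) x ys).find? p =
      (if p x then
        match ys.find? p with
        | none => some x
        | some c => if k x < k c then some x else some c
      else ys.find? p) := by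
  intro ys
  induction ys with
  | nil =>
    intro _
    by_cases hp : p x = true <;> simp [PySem.List.insertBy, List.find?, hp]
  | cons y t ih =>
    intro hpw
    have hyt : ∀ z ∈ t, k y ≤ k z := fun z hz => List.rel_of_pairwise_cons hpw hz
    have hpt := hpw.of_cons
    by_cases hlt : k x < k y
    · rw [show PySem.List.insertBy (fun a c => decide (k a < k c)) x (y :: t)
          = x :: y :: t by simp [PySem.List.insertBy, hlt]]
      by_cases hp : p x = true
      · rw [List.find?_cons_of_pos hp, if_pos hp]
        cases hf : List.find? p (y :: t) with
        | none => rfl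
        | some c =>
          have hc : c ∈ y :: t := List.mem_of_find?_eq_some hf
          have hyc : k y ≤ k c := by
            rcases List.mem_cons.1 hc with h | h
            · exact le_of_eq (by rw [h])
            · exact hyt _ h
          dsimp only
          rw [if_pos (lt_of_lt_of_le hlt hyc)]
      · rw [List.find?_cons_of_neg (by simp [hp]), if_neg (by simp [hp])]
    · rw [show PySem.List.insertBy (fun a c => decide (k a < k c)) x (y :: t)
          = y :: PySem.List.insertBy (fun a c => decide (k a < k c)) x t by
        simp [PySem.List.insertBy, hlt]]
      by_cases hpy : p y = true
      · rw [List.find?_cons_of_pos hpy]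
        rw [List.find?_cons_of_pos hpy]
        by_cases hp : p x = true
        · rw [if_pos hp]
          dsimp only
          rw [if_neg hlt]
        · rw [if_neg (by simp [hp])]
      · rw [List.find?_cons_of_neg (by simp [hpy]), List.find?_cons_of_neg (by simp [hpy])]
        exact ih hpt

-- B's scan computes the first unused element of A's proximity-sorted list
lemma bestScan_eq (b : Int) (used : PySem.Set String) (items : List (String × Int)) :
    bestScan b used items =
      ((PySem.List.sorted items (fun kv => |kv.2 - b|)).find?
        (fun kv => !PySem.Set.contains used kv.1)).map
        (fun kv => (|kv.2 - b|, kv.1, kv.2)) := by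
  induction items using List.reverseRecOn with
  | nil => rfl
  | append_singleton xs x ih =>
    have hsorted : PySem.List.sorted (xs ++ [x]) (fun kv => |kv.2 - b|)
        = PySem.List.insertBy (fun a c => decide (|a.2 - b| < |c.2 - b|)) x
            (PySem.List.sorted xs (fun kv => |kv.2 - b|)) := by
      rw [PySem.List.sorted_eq_foldl_insertBy, List.foldl_append,
        ← PySem.List.sorted_eq_foldl_insertBy]
      rfl
    rw [hsorted, find?_insertBy (fun kv => |kv.2 - b|) _ x _
      (PySem.List.sorted_pairwise xs (fun kv => |kv.2 - b|))]
    rw [show bestScan b used (xs ++ [x]) = (fun best (kv : String × Int) =>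
        if PySem.Set.contains used kv.1 then best
        else
          let d := |kv.2 - b|
          match best with
          | none => some (d, kv.1, kv.2)
          | some bb => if d < bb.1 then some (d, kv.1, kv.2) else best) (bestScan b used xs) x
      from List.foldl_append .. , ih]
    by_cases hu : PySem.Set.contains used x.1 = true
    · simp only [hu, if_true, Bool.not_true, Bool.false_eq_true, if_false]
    · simp only [hu, Bool.not_false, if_true]
      cases List.find? (fun kv => !PySem.Set.contains used kv.1)
          (PySem.List.sorted xs fun kv => |kv.2 - b|) with
      | none => rfl
      | some c =>
        simp only [Option.map_some]
        by_cases hlt : |x.2 - b| < |c.2 - b|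
        · simp [hlt]
        · simp [hlt]

-- per-bin equivalence: A's sort-then-pick equals B's two min-scans
lemma pickLoopA_sorted_eq (b : Int) (used : PySem.Set String) (items : List (String × Int)) :
    pickLoopA b (PySem.List.sorted items (fun kv => |kv.2 - b|)) used 0 = pickTwoB b used items := by
  rw [pickLoopA_zero]
  unfold pickTwoB
  rw [bestScan_eq]
  cases List.find? (fun kv => !PySem.Set.contains used kv.1)
      (PySem.List.sorted items fun kv => |kv.2 - b|) with
  | none => rfl
  | some kv =>
    obtain ⟨k1, k2⟩ := kv
    simp only [Option.map_some]
    rw [bestScan_eq]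
    cases List.find? (fun kv2 => !PySem.Set.contains (PySem.Set.add used k1) kv2.1)
        (PySem.List.sorted items fun kv => |kv.2 - b|) with
    | none => rfl
    | some kv2 => rfl

-- ===== VERDICT (by name: the statement is the Claim_ definition above) =====
theorem pick_closest_by_bins_spec : Claim_equal_pick_closest_by_bins := by
  intro lengths_dict bins _
  unfold Spec_pick_closest_by_bins pick_closest_by_bins pick_closest_by_bins_alt
  simp only []
  have hfun : (fun (st : List (Int × String × Int) × PySem.Set String) (b : Int) =>
      let sorted_by_proximity := PySem.List.sorted lengths_dict (fun kv => |kv.2 - b|)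
      let r := pickLoopA b sorted_by_proximity st.2 0
      (st.1 ++ r.1, r.2)) =
    (fun (st : List (Int × String × Int) × PySem.Set String) (b : Int) =>
      let r := pickTwoB b st.2 lengths_dict
      (st.1 ++ r.1, r.2)) := by
    funext st b
    simp only [pickLoopA_sorted_eq]
  rw [hfun]
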